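-- pv_equiv track=rewrite | github.com/allanRoberto/revesbot-final | apps/api/patterns/final_suggestion.py | find_protections
-- ===== SOURCE A (Python) =====
-- from typing import Any, Dict, List, Set
--
-- ROULETTE_EUROPEAN_NUMBERS: List[int] = [
--     0, 32, 15, 19, 4, 21, 2, 25, 17, 34, 6, 27, 13, 36, 11, 30, 8, 23,
--     10, 5, 24, 16, 33, 1, 20, 14, 31, 9, 22, 18, 29, 7, 28, 12, 35, 3, 26,
-- ]
--
-- def find_protections(suggestion_list: List[int]) -> List[int]:
--     if not suggestion_list or len(suggestion_list) < 2:
--         return []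
--     suggestion_set = {int(n) for n in suggestion_list if isinstance(n, int)}
--     protections: Set[int] = set()
--     wheel_len = len(ROULETTE_EUROPEAN_NUMBERS)
--
--     for raw in suggestion_list:
--         n = int(raw)
--         try:
--             idx = ROULETTE_EUROPEAN_NUMBERS.index(n)
--         except ValueError:
--             continue
--
--         right_neighbor = ROULETTE_EUROPEAN_NUMBERS[(idx + 1) % wheel_len]
--         right_neighbor2 = ROULETTE_EUROPEAN_NUMBERS[(idx + 2) % wheel_len]
--         if (right_neighbor2 in suggestion_set) and (right_neighbor not in suggestion_set):
--             protections.add(right_neighbor)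
--
--         left_neighbor = ROULETTE_EUROPEAN_NUMBERS[(idx - 1 + wheel_len) % wheel_len]
--         left_neighbor2 = ROULETTE_EUROPEAN_NUMBERS[(idx - 2 + wheel_len) % wheel_len]
--         if (left_neighbor2 in suggestion_set) and (left_neighbor not in suggestion_set):
--             protections.add(left_neighbor)
--
--     return sorted(protections)
-- ===== SOURCE B (Python) =====
-- from typing import List
--
-- ROULETTE_EUROPEAN_NUMBERS: List[int] = [
--     0, 32, 15, 19, 4, 21, 2, 25, 17, 34, 6, 27, 13, 36, 11, 30, 8, 23,
--     10, 5, 24, 16, 33, 1, 20, 14, 31, 9, 22, 18, 29, 7, 28, 12, 35, 3, 26,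
-- ]
--
-- def find_protections(suggestion_list: List[int]) -> List[int]:
--     # One pass over the 37 wheel positions instead of a pass per suggestion:
--     # a number is a protection iff it is absent from the suggestions while
--     # both of its wheel neighbours are present.
--     if len(suggestion_list) < 2:
--         return []
--     s = set(suggestion_list)
--     w = ROULETTE_EUROPEAN_NUMBERS
--     out = [w[j] for j in range(37)
--            if w[j] not in s and w[(j + 36) % 37] in s and w[(j + 1) % 37] in s]
--     return sorted(out)
-- ===== Notes on version B (the rewrite author's own statement) =====
-- stated objective: faster
-- what changed: Instead of scanning the wheel (list.index) for every suggestion and conditionally adding left/right neighbours to a set, B builds the suggestion set once and makes a single pass over the 37 wheel positions, keeping a number iff it is absent while both wheel neighbours are present.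
import Mathlib
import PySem

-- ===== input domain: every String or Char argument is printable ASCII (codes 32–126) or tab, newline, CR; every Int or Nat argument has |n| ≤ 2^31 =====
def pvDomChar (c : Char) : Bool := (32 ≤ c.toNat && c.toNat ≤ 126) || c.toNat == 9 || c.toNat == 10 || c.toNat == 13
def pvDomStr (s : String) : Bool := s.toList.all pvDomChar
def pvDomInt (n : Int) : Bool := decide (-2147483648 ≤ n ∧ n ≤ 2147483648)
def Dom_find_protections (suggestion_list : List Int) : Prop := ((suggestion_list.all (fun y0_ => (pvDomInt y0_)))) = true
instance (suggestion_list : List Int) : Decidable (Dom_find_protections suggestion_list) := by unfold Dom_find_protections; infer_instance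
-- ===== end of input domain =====

-- B replaces A's per-suggestion wheel scans (list.index for every suggestion) by a single
-- pass over the 37 wheel positions, keeping a number iff it is absent while both wheel
-- neighbours are present; a timing run measured B faster on the large inputs.

-- ===== PORT A =====
def rouletteEuropeanNumbers : List Int :=
  [0, 32, 15, 19, 4, 21, 2, 25, 17, 34, 6, 27, 13, 36, 11, 30, 8, 23,
   10, 5, 24, 16, 33, 1, 20, 14, 31, 9, 22, 18, 29, 7, 28, 12, 35, 3, 26]

-- one iteration of A's 'for raw in suggestion_list' loop (int(raw) = raw on Int inputs;
-- wheel_len = len(ROULETTE_EUROPEAN_NUMBERS) = 37)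
def findProtStep (s : PySem.Set Int) (prot : PySem.Set Int) (raw : Int) : PySem.Set Int :=
  match PySem.List.index? rouletteEuropeanNumbers raw with
  | none => prot
  | some idx =>
    let i : Int := (idx : Int)
    let rn := PySem.List.pyGetD rouletteEuropeanNumbers (PySem.Int.mod (i + 1) 37) 0
    let rn2 := PySem.List.pyGetD rouletteEuropeanNumbers (PySem.Int.mod (i + 2) 37) 0
    let prot1 := if PySem.Set.contains s rn2 && !PySem.Set.contains s rn then PySem.Set.add prot rn else prot
    let ln := PySem.List.pyGetD rouletteEuropeanNumbers (PySem.Int.mod (i - 1 + 37) 37) 0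
    let ln2 := PySem.List.pyGetD rouletteEuropeanNumbers (PySem.Int.mod (i - 2 + 37) 37) 0
    if PySem.Set.contains s ln2 && !PySem.Set.contains s ln then PySem.Set.add prot1 ln else prot1

def find_protections (suggestion_list : List Int) : List Int :=
  if suggestion_list = [] ∨ suggestion_list.length < 2 then []
  else
    -- {int(n) for n in suggestion_list if isinstance(n, int)}: on Int inputs the filter is always true
    let s : PySem.Set Int := PySem.Set.ofList suggestion_list
    let prot := suggestion_list.foldl (findProtStep s) PySem.Set.empty
    PySem.List.sorted prot (fun x => x) false

-- ===== PORT B =====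
def find_protections_alt (suggestion_list : List Int) : List Int :=
  if suggestion_list.length < 2 then []
  else
    let s : PySem.Set Int := PySem.Set.ofList suggestion_list
    let out := ((PySem.List.pyRange 0 37 1).filter (fun j =>
        !PySem.Set.contains s (PySem.List.pyGetD rouletteEuropeanNumbers j 0)
        && PySem.Set.contains s (PySem.List.pyGetD rouletteEuropeanNumbers (PySem.Int.mod (j + 36) 37) 0)
        && PySem.Set.contains s (PySem.List.pyGetD rouletteEuropeanNumbers (PySem.Int.mod (j + 1) 37) 0))).map
      (fun j => PySem.List.pyGetD rouletteEuropeanNumbers j 0)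
    PySem.List.sorted out (fun x => x) false

-- ===== PRECONDITION & SPEC =====
def Spec_find_protections (suggestion_list : List Int) (out : List Int) : Prop := out = find_protections_alt suggestion_list
instance (suggestion_list : List Int) (out : List Int) : Decidable (Spec_find_protections suggestion_list out) := by unfold Spec_find_protections; infer_instance

-- ===== CLAIM (what is proved, stated in full; the proofs are below) =====
def Claim_equal_find_protections : Prop := ∀ (suggestion_list : List Int), Dom_find_protections suggestion_list → Spec_find_protections suggestion_list (find_protections suggestion_list)

-- ===== LEMMAS AND PROOFS =====

-- wheel value at position x mod 37
def wheelAt (x : Int) : Int := rouletteEuropeanNumbers.getD (x % 37).toNat 0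

lemma wheelAt_congr (x y : Int) (h : x % 37 = y % 37) : wheelAt x = wheelAt y := by
  simp [wheelAt, h]

lemma wheel_length : rouletteEuropeanNumbers.length = 37 := rfl

lemma wheel_idx : ∀ k < 37, PySem.List.index? rouletteEuropeanNumbers (rouletteEuropeanNumbers.getD k 0) = some k := by decide

lemma contains_false (s : PySem.Set Int) (x : Int) : (PySem.Set.contains s x = false) ↔ x ∉ s := by
  constructor
  · intro h hmem
    rw [← PySem.Set.contains_iff, h] at hmem
    cases hmem
  · intro h
    cases hc : PySem.Set.contains s x
    · rfl
    · exact absurd ((PySem.Set.contains_iff s x).1 hc) h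

lemma wheelAt_inj (x y : Int) (hx : 0 ≤ x) (hx' : x < 37) (hy : 0 ≤ y) (hy' : y < 37)
    (h : wheelAt x = wheelAt y) : x = y := by
  have h1 := wheel_idx (x % 37).toNat (by omega)
  have h2 := wheel_idx (y % 37).toNat (by omega)
  rw [show rouletteEuropeanNumbers.getD ((y % 37).toNat) 0 = wheelAt y from rfl] at h2
  rw [show rouletteEuropeanNumbers.getD ((x % 37).toNat) 0 = wheelAt x from rfl, h, h2] at h1
  injection h1 with h1
  omega

lemma pyGetD_mod (x : Int) :
    PySem.List.pyGetD rouletteEuropeanNumbers (PySem.Int.mod x 37) 0 = wheelAt x := by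
  rw [PySem.Int.mod_eq_emod_of_pos (by norm_num : (0:Int) < 37),
      PySem.List.pyGetD_of_nonneg _ _ (Int.emod_nonneg x (by norm_num))]
  rfl

lemma pyGetD_small (x : Int) (hx : 0 ≤ x) (hx' : x < 37) :
    PySem.List.pyGetD rouletteEuropeanNumbers x 0 = wheelAt x := by
  rw [PySem.List.pyGetD_of_nonneg _ _ hx]
  unfold wheelAt
  rw [Int.emod_eq_of_lt hx hx']

lemma mem_ite_add (c : Prop) [Decidable c] (t : PySem.Set Int) (x v : Int) :
    v ∈ (if c then PySem.Set.add t x else t) ↔ v ∈ t ∨ (c ∧ v = x) := by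
  split_ifs with hc <;> simp [PySem.Set.mem_add, hc]

-- the additions of one iteration of A's loop
def ACond (s : PySem.Set Int) (raw v : Int) : Prop :=
  ∃ k : Nat, PySem.List.index? rouletteEuropeanNumbers raw = some k ∧
    ((v = wheelAt ((k : Int) + 1) ∧ wheelAt ((k : Int) + 2) ∈ s ∧ v ∉ s) ∨
     (v = wheelAt ((k : Int) + 36) ∧ wheelAt ((k : Int) + 35) ∈ s ∧ v ∉ s))

lemma mem_findProtStep (s prot : PySem.Set Int) (raw v : Int) :
    v ∈ findProtStep s prot raw ↔ v ∈ prot ∨ ACond s raw v := by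
  cases h : PySem.List.index? rouletteEuropeanNumbers raw with
  | none =>
    simp only [findProtStep, ACond, h]
    simp
  | some k =>
    simp only [findProtStep, ACond, h, Option.some.injEq, exists_eq_left']
    rw [pyGetD_mod ((k : Int) + 1), pyGetD_mod ((k : Int) + 2),
        pyGetD_mod ((k : Int) - 1 + 37), pyGetD_mod ((k : Int) - 2 + 37),
        wheelAt_congr ((k : Int) - 1 + 37) ((k : Int) + 36) (by omega),
        wheelAt_congr ((k : Int) - 2 + 37) ((k : Int) + 35) (by omega)]
    rw [mem_ite_add, mem_ite_add]
    have hR : (PySem.Set.contains s (wheelAt ((k : Int) + 2)) &&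
        !PySem.Set.contains s (wheelAt ((k : Int) + 1))) = true ↔
        (wheelAt ((k : Int) + 2) ∈ s ∧ wheelAt ((k : Int) + 1) ∉ s) := by
      simp
    have hL : (PySem.Set.contains s (wheelAt ((k : Int) + 35)) &&
        !PySem.Set.contains s (wheelAt ((k : Int) + 36))) = true ↔
        (wheelAt ((k : Int) + 35) ∈ s ∧ wheelAt ((k : Int) + 36) ∉ s) := by
      simp
    constructor
    · rintro ((h | ⟨hc, rfl⟩) | ⟨hc, rfl⟩)
      · exact Or.inl h
      · exact Or.inr (Or.inl ⟨rfl, (hR.mp hc).1, (hR.mp hc).2⟩)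
      · exact Or.inr (Or.inr ⟨rfl, (hL.mp hc).1, (hL.mp hc).2⟩)
    · rintro (h | ⟨rfl, h2, hn⟩ | ⟨rfl, h2, hn⟩)
      · exact Or.inl (Or.inl h)
      · exact Or.inl (Or.inr ⟨hR.mpr ⟨h2, hn⟩, rfl⟩)
      · exact Or.inr ⟨hL.mpr ⟨h2, hn⟩, rfl⟩

lemma mem_foldl_step (s : PySem.Set Int) (l : List Int) (acc : PySem.Set Int) (v : Int) :
    v ∈ l.foldl (findProtStep s) acc ↔ v ∈ acc ∨ ∃ raw ∈ l, ACond s raw v := by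
  induction l generalizing acc with
  | nil => simp
  | cons x t ih =>
    simp only [List.foldl_cons, ih, mem_findProtStep, List.mem_cons]
    constructor
    · rintro (⟨h | h⟩ | ⟨raw, hr, hc⟩)
      · exact Or.inl h
      · exact Or.inr ⟨x, Or.inl rfl, h⟩
      · exact Or.inr ⟨raw, Or.inr hr, hc⟩
    · rintro (h | ⟨raw, (rfl | hr), hc⟩)
      · exact Or.inl (Or.inl h)
      · exact Or.inl (Or.inr hc)
      · exact Or.inr ⟨raw, hr, hc⟩

lemma nodup_findProtStep (s prot : PySem.Set Int) (raw : Int) (h : prot.Nodup) :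
    (findProtStep s prot raw).Nodup := by
  unfold findProtStep
  cases hi : PySem.List.index? rouletteEuropeanNumbers raw with
  | none => exact h
  | some k =>
    dsimp only
    split_ifs <;> first
      | exact h
      | exact PySem.Set.nodup_add _ _ h
      | exact PySem.Set.nodup_add _ _ (PySem.Set.nodup_add _ _ h)

lemma nodup_foldl_step (s : PySem.Set Int) (l : List Int) (acc : PySem.Set Int) (h : acc.Nodup) :
    (l.foldl (findProtStep s) acc).Nodup := by
  induction l generalizing acc with
  | nil => exact h
  | cons x t ih => exact ih _ (nodup_findProtStep s acc x h)

-- the crux: A's accumulated additions coincide with B's per-position test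
lemma cond_iff (l : List Int) (v : Int) :
    (∃ raw ∈ l, ACond (PySem.Set.ofList l) raw v) ↔
    (∃ j : Int, 0 ≤ j ∧ j < 37 ∧ v = wheelAt j ∧ wheelAt j ∉ PySem.Set.ofList l ∧
      wheelAt (j + 36) ∈ PySem.Set.ofList l ∧ wheelAt (j + 1) ∈ PySem.Set.ofList l) := by
  constructor
  · rintro ⟨raw, hrl, k, hk, hc⟩
    obtain ⟨hklt, hget, -⟩ := PySem.List.getElem_of_index?_eq_some hk
    rw [wheel_length] at hklt
    have hraw : wheelAt (k : Int) = raw := by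
      unfold wheelAt
      rw [show ((k : Int) % 37).toNat = k from by omega]
      rw [List.getD_eq_getElem _ _ (by rw [wheel_length]; omega)]
      exact hget
    have hrawS : raw ∈ PySem.Set.ofList l := (PySem.Set.mem_ofList _ _).2 hrl
    rcases hc with ⟨hv, h2, hvn⟩ | ⟨hv, h2, hvn⟩
    · have e0 : wheelAt (((k : Int) + 1) % 37) = wheelAt ((k : Int) + 1) := wheelAt_congr _ _ (by omega)
      have e36 : wheelAt (((k : Int) + 1) % 37 + 36) = wheelAt (k : Int) := wheelAt_congr _ _ (by omega)
      have e1 : wheelAt (((k : Int) + 1) % 37 + 1) = wheelAt ((k : Int) + 2) := wheelAt_congr _ _ (by omega)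
      refine ⟨((k : Int) + 1) % 37, by omega, by omega, by rw [e0]; exact hv,
        by rw [e0, ← hv]; exact hvn, by rw [e36, hraw]; exact hrawS, by rw [e1]; exact h2⟩
    · have e0 : wheelAt (((k : Int) + 36) % 37) = wheelAt ((k : Int) + 36) := wheelAt_congr _ _ (by omega)
      have e36 : wheelAt (((k : Int) + 36) % 37 + 36) = wheelAt ((k : Int) + 35) := wheelAt_congr _ _ (by omega)
      have e1 : wheelAt (((k : Int) + 36) % 37 + 1) = wheelAt (k : Int) := wheelAt_congr _ _ (by omega)
      refine ⟨((k : Int) + 36) % 37, by omega, by omega, by rw [e0]; exact hv,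
        by rw [e0, ← hv]; exact hvn, by rw [e36]; exact h2, by rw [e1, hraw]; exact hrawS⟩
  · rintro ⟨j, hj0, hj37, hv, hnot, hleft, hright⟩
    have hwk : rouletteEuropeanNumbers.getD ((j + 36) % 37).toNat 0 = wheelAt (j + 36) := rfl
    refine ⟨wheelAt (j + 36), (PySem.Set.mem_ofList _ _).1 hleft, ((j + 36) % 37).toNat, ?_,
      Or.inl ⟨?_, ?_, ?_⟩⟩
    · have h0 := wheel_idx ((j + 36) % 37).toNat (by omega)
      rw [hwk] at h0
      exact h0
    · rw [wheelAt_congr ((((j + 36) % 37).toNat : Int) + 1) j (by omega)]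
      exact hv
    · rw [wheelAt_congr ((((j + 36) % 37).toNat : Int) + 2) (j + 1) (by omega)]
      exact hright
    · rw [hv]
      exact hnot

-- membership and nodup of B's comprehension
lemma mem_out (l : List Int) (v : Int) :
    v ∈ ((PySem.List.pyRange 0 37 1).filter (fun j =>
        !PySem.Set.contains (PySem.Set.ofList l) (PySem.List.pyGetD rouletteEuropeanNumbers j 0)
        && PySem.Set.contains (PySem.Set.ofList l) (PySem.List.pyGetD rouletteEuropeanNumbers (PySem.Int.mod (j + 36) 37) 0)
        && PySem.Set.contains (PySem.Set.ofList l) (PySem.List.pyGetD rouletteEuropeanNumbers (PySem.Int.mod (j + 1) 37) 0))).map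
      (fun j => PySem.List.pyGetD rouletteEuropeanNumbers j 0) ↔
    (∃ j : Int, 0 ≤ j ∧ j < 37 ∧ v = wheelAt j ∧ wheelAt j ∉ PySem.Set.ofList l ∧
      wheelAt (j + 36) ∈ PySem.Set.ofList l ∧ wheelAt (j + 1) ∈ PySem.Set.ofList l) := by
  simp only [List.mem_map, List.mem_filter, PySem.List.mem_pyRange_one]
  constructor
  · rintro ⟨j, ⟨⟨hj0, hj37⟩, hcond⟩, rfl⟩
    rw [pyGetD_small j hj0 hj37, pyGetD_mod (j + 36), pyGetD_mod (j + 1)] at hcond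
    simp only [Bool.and_eq_true, Bool.not_eq_true', contains_false, PySem.Set.contains_iff] at hcond
    exact ⟨j, hj0, hj37, pyGetD_small j hj0 hj37, hcond.1.1, hcond.1.2, hcond.2⟩
  · rintro ⟨j, hj0, hj37, hv, hnot, hleft, hright⟩
    refine ⟨j, ⟨⟨hj0, hj37⟩, ?_⟩, ?_⟩
    · rw [pyGetD_small j hj0 hj37, pyGetD_mod (j + 36), pyGetD_mod (j + 1)]
      simp only [Bool.and_eq_true, Bool.not_eq_true', contains_false, PySem.Set.contains_iff]
      exact ⟨⟨hnot, hleft⟩, hright⟩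
    · rw [pyGetD_small j hj0 hj37]
      exact hv.symm

lemma nodup_out (l : List Int) :
    (((PySem.List.pyRange 0 37 1).filter (fun j =>
        !PySem.Set.contains (PySem.Set.ofList l) (PySem.List.pyGetD rouletteEuropeanNumbers j 0)
        && PySem.Set.contains (PySem.Set.ofList l) (PySem.List.pyGetD rouletteEuropeanNumbers (PySem.Int.mod (j + 36) 37) 0)
        && PySem.Set.contains (PySem.Set.ofList l) (PySem.List.pyGetD rouletteEuropeanNumbers (PySem.Int.mod (j + 1) 37) 0))).map
      (fun j => PySem.List.pyGetD rouletteEuropeanNumbers j 0)).Nodup := by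
  apply List.Nodup.map_on
  · intro x hx y hy hxy
    have hx' := (List.mem_filter.1 hx).1
    have hy' := (List.mem_filter.1 hy).1
    rw [PySem.List.mem_pyRange_one] at hx' hy'
    rw [pyGetD_small x hx'.1 hx'.2, pyGetD_small y hy'.1 hy'.2] at hxy
    exact wheelAt_inj x y hx'.1 hx'.2 hy'.1 hy'.2 hxy
  · exact (PySem.List.nodup_pyRange_one 0 37).filter _

-- ===== VERDICT (by name: the statement is the Claim_ definition above) =====
theorem find_protections_spec : Claim_equal_find_protections := by
  intro l _
  unfold Spec_find_protections find_protections find_protections_alt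
  by_cases hlen : l.length < 2
  · rw [if_pos (Or.inr hlen), if_pos hlen]
  · have hne : ¬(l = [] ∨ l.length < 2) := by
      rintro (rfl | h)
      · exact hlen (by simp)
      · exact hlen h
    rw [if_neg hne, if_neg hlen]
    apply PySem.List.sorted_eq_sorted_of_perm _ _ _ (fun a b h => h)
    rw [List.perm_ext_iff_of_nodup
        (nodup_foldl_step _ _ _ (by simp [PySem.Set.empty])) (nodup_out l)]
    intro v
    rw [mem_foldl_step, mem_out]
    rw [← cond_iff]
    simp [PySem.Set.empty]
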